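-- pv_equiv track=rewrite | github.com/nixxholas/IS111-rekt | Seminar9/ICE/q5.py | get_strings_with_digits
-- ===== SOURCE A (Python) =====
-- def get_strings_with_digits(str_list, t):
--     # Define a traversing index and a digit counter
--     index, count = 0, 0
--     # Loop the str_list
--     while index < len(str_list):
--         # if we've hit the digit threshold, immediately return the list till the traversing index.
--         if count > t:
--             return str_list[:index]
--         # Else continue tabulating the count of digits in the current string of the index.
--         else:
--             # I mean, we have other ways to do this but who won't want a primitive one-liner?
--             count += sum(ch.isdigit() for ch in str_list[index])
--             index += 1
--
--     # Return original ofc, lil shit is giving wrong data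
--     return str_list
-- ===== SOURCE B (Python) =====
-- def get_strings_with_digits(str_list, t):
--     # prefix[i] = number of digit characters in str_list[:i]
--     prefix = [0]
--     for s in str_list:
--         prefix.append(prefix[-1] + sum(1 for ch in s if ch.isdigit()))
--     # prefix is non-decreasing: binary search for the first index i in
--     # [0, len(str_list)) with prefix[i] > t (lo = len if no crossing)
--     lo, hi = 0, len(str_list)
--     while lo < hi:
--         mid = (lo + hi) // 2
--         if prefix[mid] > t:
--             hi = mid
--         else:
--             lo = mid + 1
--     return str_list[:lo]
-- ===== Notes on version B (the rewrite author's own statement) =====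
-- stated objective: alternative
-- what changed: A fuses counting and the threshold test into one early-returning while loop; B first builds the full cumulative digit-count table with one pass, then locates the first index whose prefix count exceeds t by binary search over the monotone table, and slices once.
import Mathlib
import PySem

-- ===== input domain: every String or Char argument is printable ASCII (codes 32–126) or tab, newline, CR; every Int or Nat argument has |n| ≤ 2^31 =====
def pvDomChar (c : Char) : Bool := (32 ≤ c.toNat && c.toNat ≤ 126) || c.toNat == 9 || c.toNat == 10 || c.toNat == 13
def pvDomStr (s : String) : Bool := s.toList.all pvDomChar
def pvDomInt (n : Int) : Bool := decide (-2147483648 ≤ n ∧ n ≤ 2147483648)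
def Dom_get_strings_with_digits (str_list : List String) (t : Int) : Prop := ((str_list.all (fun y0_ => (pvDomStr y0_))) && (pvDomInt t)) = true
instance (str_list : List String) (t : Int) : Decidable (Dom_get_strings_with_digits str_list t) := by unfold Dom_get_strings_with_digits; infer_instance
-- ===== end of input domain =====

-- B replaces A's fused running-sum-with-early-return loop by a prefix-sum table plus a
-- binary search for the first crossing index (objective: alternative decomposition).

-- ===== PORT A =====
-- the while loop of A: state (index, count), branches in A's order
def pvALoop (str_list : List String) (t : Int) (index : Nat) (count : Int) : List String :=
  if index < str_list.length then
    if count > t then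
      PySem.List.slice str_list none (some (index : Int))          -- str_list[:index]
    else
      pvALoop str_list t (index + 1)
        (count + ((PySem.List.pyGetD str_list (index : Int) "").toList.map
            (fun ch => if PySem.Chars.isdigit ch then (1 : Int) else 0)).sum)
  else str_list
termination_by str_list.length - index

def get_strings_with_digits (str_list : List String) (t : Int) : List String :=
  pvALoop str_list t 0 0

-- ===== PORT B =====
-- one step of B's prefix-building loop: prefix.append(prefix[-1] + sum(1 for ch in s if ch.isdigit()))
def pvBStep (pre : List Int) (s : String) : List Int :=
  pre ++ [PySem.List.pyGetD pre (-1) 0 +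
          ((s.toList.countP (fun ch => PySem.Chars.isdigit ch) : Nat) : Int)]

-- B's binary-search loop; lo, hi are non-negative, so Python's (lo+hi)//2 is Nat division
def pvBSearch (pre : List Int) (t : Int) (lo hi : Nat) : Nat :=
  if lo < hi then
    if PySem.List.pyGetD pre ((lo + hi) / 2 : Nat) 0 > t then
      pvBSearch pre t lo ((lo + hi) / 2)
    else
      pvBSearch pre t ((lo + hi) / 2 + 1) hi
  else lo
termination_by hi - lo
decreasing_by all_goals omega

def get_strings_with_digits_alt (str_list : List String) (t : Int) : List String :=
  let pre := str_list.foldl pvBStep [(0 : Int)]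
  let lo := pvBSearch pre t 0 str_list.length
  PySem.List.slice str_list none (some (lo : Int))                 -- str_list[:lo]

-- ===== PRECONDITION & SPEC =====
def Spec_get_strings_with_digits (str_list : List String) (t : Int) (out : List String) : Prop := out = get_strings_with_digits_alt str_list t
instance (str_list : List String) (t : Int) (out : List String) : Decidable (Spec_get_strings_with_digits str_list t out) := by unfold Spec_get_strings_with_digits; infer_instance

-- ===== CLAIM (what is proved, stated in full; the proofs are below) =====
def Claim_equal_get_strings_with_digits : Prop := ∀ (str_list : List String) (t : Int), Dom_get_strings_with_digits str_list t → Spec_get_strings_with_digits str_list t (get_strings_with_digits str_list t)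

-- ===== LEMMAS AND PROOFS =====

-- digit count of one string
def pvDC (s : String) : Int := ((s.toList.countP (fun ch => PySem.Chars.isdigit ch) : Nat) : Int)

-- cumulative digit count of the first i strings
def pvP (l : List String) (i : Nat) : Int := ((l.take i).map pvDC).sum

-- the tail of B's prefix table, starting from running total c
def pvPrefixFrom (l : List String) (c : Int) : List Int :=
  match l with
  | [] => []
  | s :: r => (c + pvDC s) :: pvPrefixFrom r (c + pvDC s)

lemma pvDC_nonneg (s : String) : 0 ≤ pvDC s := by
  simp [pvDC]

lemma pvP_zero (l : List String) : pvP l 0 = 0 := by simp [pvP]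

lemma pvP_succ (l : List String) (i : Nat) (h : i < l.length) :
    pvP l (i + 1) = pvP l i + pvDC (l.getD i "") := by
  have h' : i < (l.map pvDC).length := by simpa using h
  rw [pvP, pvP, List.map_take, List.map_take, List.take_add_one,
      List.getElem?_eq_getElem h', List.getElem_map, List.getD_eq_getElem l "" h]
  simp

lemma pvP_mono (l : List String) {i j : Nat} (h : i ≤ j) : pvP l i ≤ pvP l j := by
  induction j with
  | zero => simp_all
  | succ j ih =>
    rcases Nat.lt_or_ge j l.length with hj | hj
    · rcases Nat.eq_or_lt_of_le h with rfl | h'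
      · exact le_refl _
      · exact le_trans (ih (by omega)) (by rw [pvP_succ l j hj]; have := pvDC_nonneg (l.getD j ""); omega)
    · have heq : l.take (j + 1) = l.take j := by
        rw [List.take_of_length_le hj, List.take_of_length_le (by omega)]
      rcases Nat.eq_or_lt_of_le h with rfl | h'
      · exact le_refl _
      · simpa [pvP, heq] using ih (by omega)

-- B's foldl builds the prefix table
lemma pvBStep_foldl (l : List String) (pre0 : List Int) (c : Int) :
    l.foldl pvBStep (pre0 ++ [c]) = pre0 ++ [c] ++ pvPrefixFrom l c := by
  induction l generalizing pre0 c with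
  | nil => simp [pvPrefixFrom]
  | cons s r ih =>
    show r.foldl pvBStep (pvBStep (pre0 ++ [c]) s) = _
    rw [pvBStep, PySem.List.pyGetD_neg_one_append_singleton]
    have h2 := ih (pre0 ++ [c]) (c + pvDC s)
    simp only [pvDC] at h2
    rw [h2, pvPrefixFrom]
    simp [pvDC]

-- indexing the prefix table gives pvP
lemma pvPrefix_getD (l : List String) (c : Int) (i : Nat) (h : i ≤ l.length) :
    (c :: pvPrefixFrom l c).getD i 0 = c + pvP l i := by
  induction l generalizing c i with
  | nil =>
    have : i = 0 := by simpa using h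
    subst this
    simp [pvPrefixFrom, pvP]
  | cons s r ih =>
    cases i with
    | zero => simp [pvP]
    | succ i =>
      have hr : i ≤ r.length := by simpa using h
      show ((c + pvDC s) :: pvPrefixFrom r (c + pvDC s)).getD i 0 = _
      rw [ih (c + pvDC s) i hr]
      have hP : pvP (s :: r) (i + 1) = pvDC s + pvP r i := by
        simp [pvP]
      rw [hP]; ring

-- the characterisation both programs compute: r is the first crossing index (or the length)
def pvIsCross (l : List String) (t : Int) (r : Nat) : Prop :=
  r ≤ l.length ∧ (∀ j < r, pvP l j ≤ t) ∧ (r = l.length ∨ pvP l r > t)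

-- B's binary search lands on the crossing index
theorem pvBSearch_spec (l : List String) (t : Int) (pre : List Int)
    (hpre : ∀ i ≤ l.length, pre.getD i 0 = pvP l i)
    (lo hi : Nat) (h1 : lo ≤ hi) (h2 : hi ≤ l.length)
    (hlow : ∀ j < lo, pvP l j ≤ t) (hhigh : hi = l.length ∨ pvP l hi > t) :
    pvIsCross l t (pvBSearch pre t lo hi) := by
  rw [pvBSearch]
  split_ifs with hlt hcmp
  · rw [PySem.List.pyGetD_natCast, hpre _ (by omega)] at hcmp
    exact pvBSearch_spec l t pre hpre lo ((lo + hi) / 2) (by omega) (by omega) hlow (Or.inr hcmp)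
  · rw [PySem.List.pyGetD_natCast, hpre _ (by omega)] at hcmp
    refine pvBSearch_spec l t pre hpre ((lo + hi) / 2 + 1) hi (by omega) h2 ?_ hhigh
    intro j hj
    exact le_trans (pvP_mono l (by omega : j ≤ (lo + hi) / 2)) (by omega)
  · refine ⟨by omega, hlow, ?_⟩
    have hl : lo = hi := by omega
    rw [hl]
    exact hhigh
termination_by hi - lo
decreasing_by all_goals omega

-- A's loop returns the prefix up to the crossing index
theorem pvALoop_spec (l : List String) (t : Int) (r : Nat) (hr : pvIsCross l t r)
    (index : Nat) (h : index ≤ r) :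
    pvALoop l t index (pvP l index) = l.take r := by
  obtain ⟨hrlen, hlow, hcross⟩ := hr
  rw [pvALoop]
  split_ifs with hlt hcnt
  · -- A returns str_list[:index]; here index must equal r
    have hir : index = r := by
      by_contra hne
      exact absurd hcnt (not_lt.mpr (hlow index (by omega)))
    subst hir
    rw [PySem.List.slice_to_natCast]
  · -- A keeps looping
    have h1 : index + 1 ≤ r := by
      rcases Nat.eq_or_lt_of_le h with rfl | h'
      · rcases hcross with he | hg
        · omega
        · exact absurd hg hcnt
      · omega
    have hrec := pvALoop_spec l t r ⟨hrlen, hlow, hcross⟩ (index + 1) h1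
    rw [PySem.List.pyGetD_natCast, PySem.List.sum_map_ite_one_zero]
    have hcount : pvP l index + (((l.getD index "").toList.countP
        (fun ch => PySem.Chars.isdigit ch) : Nat) : Int) = pvP l (index + 1) := by
      rw [pvP_succ l index hlt]; rfl
    rw [hcount]
    exact hrec
  · -- index = length: A returns the whole list
    have hlen : r = l.length := by omega
    rw [hlen, List.take_length]
termination_by l.length - index
decreasing_by omega

theorem pv_main (l : List String) (t : Int) :
    get_strings_with_digits l t = get_strings_with_digits_alt l t := by
  have hpre : ∀ i ≤ l.length, (l.foldl pvBStep [(0 : Int)]).getD i 0 = pvP l i := by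
    intro i hi
    have hb := pvBStep_foldl l [] 0
    simp only [List.nil_append] at hb
    rw [hb]
    simpa using pvPrefix_getD l 0 i hi
  have hcross := pvBSearch_spec l t _ hpre 0 l.length (by omega) (le_refl _)
    (by omega) (Or.inl rfl)
  have ha := pvALoop_spec l t _ hcross 0 (by omega)
  rw [pvP_zero] at ha
  show pvALoop l t 0 0 = PySem.List.slice l none
    (some ((pvBSearch (l.foldl pvBStep [(0 : Int)]) t 0 l.length : Nat) : Int))
  rw [PySem.List.slice_to_natCast]
  exact ha

-- ===== VERDICT (by name: the statement is the Claim_ definition above) =====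
theorem get_strings_with_digits_spec : Claim_equal_get_strings_with_digits := by
  intro l t _
  show _ = _
  exact pv_main l t
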